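-- pv_equiv track=rewrite | github.com/TasumLuke/Terrorism-Counter-Insurgency | research_tools/analysis/toolkit.py | lag
-- ===== SOURCE A (Python) =====
-- def lag(series, groups=None):
--     # if groups is None, treat as single group
--     if groups is None:
--         return [None] + list(series[:-1])
--     out = [None] * len(series)
--     prev = {}
--     for i in range(len(series)):
--         g = groups[i]
--         out[i] = prev.get(g)
--         prev[g] = series[i]
--     return out
-- ===== SOURCE B (Python) =====
-- def lag(series, groups=None):
--     # if groups is None, treat as single group
--     if groups is None:
--         return [None] + list(series[:-1])
--     def prev_of(i):
--         # scan backwards for the most recent index with the same group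
--         for j in range(i - 1, -1, -1):
--             if groups[j] == groups[i]:
--                 return series[j]
--         return None
--     return [prev_of(i) for i in range(len(series))]
-- ===== Notes on version B (the rewrite author's own statement) =====
-- stated objective: simpler
-- what changed: Replaces A's stateful single pass with a running last-value-per-group dict by a stateless comprehension that, for each index, scans backwards for the most recent earlier index with the same group; no dict and no mutated output list.
import Mathlib
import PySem

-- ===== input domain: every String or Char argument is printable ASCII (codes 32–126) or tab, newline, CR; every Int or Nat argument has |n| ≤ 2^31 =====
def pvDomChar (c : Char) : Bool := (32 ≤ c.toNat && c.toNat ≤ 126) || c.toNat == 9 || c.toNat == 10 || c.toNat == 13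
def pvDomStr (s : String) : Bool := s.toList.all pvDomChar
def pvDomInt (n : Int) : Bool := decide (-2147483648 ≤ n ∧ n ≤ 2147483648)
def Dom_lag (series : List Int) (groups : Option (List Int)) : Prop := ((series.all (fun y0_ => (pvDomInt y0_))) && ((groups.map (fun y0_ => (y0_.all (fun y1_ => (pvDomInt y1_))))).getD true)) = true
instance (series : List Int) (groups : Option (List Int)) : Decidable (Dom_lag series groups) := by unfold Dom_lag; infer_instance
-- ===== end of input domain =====

-- B replaces A's stateful dict-carrying pass by a stateless per-index backward scan for the most
-- recent same-group index; objective: simpler (no dict, no mutation), not faster.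


-- ===== PORT A =====
def lag (series : List Int) (groups : Option (List Int)) : List (Option Int) :=
  match groups with
  | none => none :: (PySem.List.slice series none (some (-1))).map some
  | some gl =>
    let st := (PySem.List.pyRange 0 (series.length : Int) 1).foldl
      (fun (st : List (Option Int) × PySem.Dict Int Int) i =>
        let g := PySem.List.pyGetD gl i 0
        let out := PySem.List.pySetD st.1 i (st.2.get? g)
        (out, st.2.insert g (PySem.List.pyGetD series i 0)))
      (List.replicate series.length (none : Option Int), PySem.Dict.empty)
    st.1

-- ===== PORT B =====
-- 'for j in range(i-1, -1, -1): if groups[j] == groups[i]: return series[j]' — a downward scan,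
-- ported as structural recursion on the number of candidate indices (j = k-1, k-2, …, 0).
def prevOf (series gl : List Int) (g : Int) : Nat → Option Int
  | 0 => none
  | k + 1 =>
    if PySem.List.pyGetD gl (k : Int) 0 == g then some (PySem.List.pyGetD series (k : Int) 0)
    else prevOf series gl g k

def lag_alt (series : List Int) (groups : Option (List Int)) : List (Option Int) :=
  match groups with
  | none => none :: (PySem.List.slice series none (some (-1))).map some
  | some gl =>
    (List.range series.length).map (fun i => prevOf series gl (PySem.List.pyGetD gl (Int.ofNat i) 0) i)

-- ===== PRECONDITION & SPEC =====
-- Pre_ excludes exactly the inputs where the Python A raises IndexError: a groups list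
-- shorter than series (A reads groups[i] for every i < len(series)).
def Pre_lag (series : List Int) (groups : Option (List Int)) : Prop :=
  ((groups.map (fun gl => decide (series.length ≤ gl.length))).getD true) = true
instance (series : List Int) (groups : Option (List Int)) : Decidable (Pre_lag series groups) := by unfold Pre_lag; infer_instance

def pvWitness_lag : List Int × Option (List Int) := ([5, 7, 9], some [1, 2, 1])

def Spec_lag (series : List Int) (groups : Option (List Int)) (out : List (Option Int)) : Prop := out = lag_alt series groups
instance (series : List Int) (groups : Option (List Int)) (out : List (Option Int)) : Decidable (Spec_lag series groups out) := by unfold Spec_lag; infer_instance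

-- ===== CLAIM (what is proved, stated in full; the proofs are below) =====
def Claim_equal_lag : Prop := ∀ (series : List Int) (groups : Option (List Int)), Dom_lag series groups → Pre_lag series groups → Spec_lag series groups (lag series groups)

-- ===== LEMMAS AND PROOFS =====

-- the group of index k (both ports read it as pyGetD gl k 0)
def grpOf (gl : List Int) (k : Nat) : Int := gl.getD k 0
-- positions of group g among indices < n, in increasing order
def posIdx (gl : List Int) (n : Nat) (g : Int) : List Nat :=
  (List.range n).filter (fun k => grpOf gl k == g)
-- the value both programs must produce at index i
def aval (series gl : List Int) (i : Nat) : Option Int :=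
  ((posIdx gl i (grpOf gl i)).getLast?).map (fun k => series.getD k 0)
def target (series gl : List Int) : List (Option Int) :=
  (List.range series.length).map (aval series gl)

lemma posIdx_succ (gl : List Int) (n : Nat) (g : Int) :
    posIdx gl (n + 1) g = posIdx gl n g ++ (if grpOf gl n == g then [n] else []) := by
  simp [posIdx, List.range_succ, List.filter_append, List.filter_cons]

lemma prevOf_eq_getLast (series gl : List Int) (g : Int) :
    ∀ m, prevOf series gl g m = ((posIdx gl m g).getLast?).map (fun k => series.getD k 0) := by
  intro m
  induction m with
  | zero => simp [prevOf, posIdx]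
  | succ m ih =>
    rw [prevOf, posIdx_succ, ih, PySem.List.pyGetD_natCast, PySem.List.pyGetD_natCast]
    by_cases h : grpOf gl m == g
    · simp [grpOf] at h ⊢
      simp [h]
    · simp [grpOf] at h ⊢
      simp [h]

lemma lag_alt_grouped (series gl : List Int) :
    lag_alt series (some gl) = target series gl := by
  unfold lag_alt target
  apply List.map_congr_left
  intro i hi
  have : PySem.List.pyGetD gl (Int.ofNat i) 0 = grpOf gl i := PySem.List.pyGetD_natCast ..
  rw [this, prevOf_eq_getLast]
  rfl

lemma pySetD_eq_set {α : Type} (out : List α) (k : Nat) (v : α) (h : k < out.length) :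
    PySem.List.pySetD out (k : Int) v = out.set k v := by
  simp [PySem.List.pySetD, PySem.List.pySet?, PySem.List.pyIdx?, h]

lemma A_inv (series gl : List Int) :
    ∀ m, m ≤ series.length →
    ((List.range m).foldl
        (fun (st : List (Option Int) × PySem.Dict Int Int) (k : Nat) =>
          (PySem.List.pySetD st.1 (k : Int) (st.2.get? (grpOf gl k)),
           st.2.insert (grpOf gl k) (series.getD k 0)))
        (List.replicate series.length (none : Option Int), PySem.Dict.empty)).1
      = (List.range series.length).map (fun i => if i < m then aval series gl i else none)
    ∧ ∀ g, ((List.range m).foldl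
        (fun (st : List (Option Int) × PySem.Dict Int Int) (k : Nat) =>
          (PySem.List.pySetD st.1 (k : Int) (st.2.get? (grpOf gl k)),
           st.2.insert (grpOf gl k) (series.getD k 0)))
        (List.replicate series.length (none : Option Int), PySem.Dict.empty)).2.get? g
      = ((posIdx gl m g).getLast?).map (fun k => series.getD k 0) := by
  intro m
  induction m with
  | zero =>
    intro _
    constructor
    · apply List.ext_getElem (by simp)
      intro j hj1 hj2
      simp
    · intro g
      simp [PySem.Dict.get?_empty, posIdx]
  | succ m ih =>
    intro hm
    obtain ⟨h1, h2⟩ := ih (by omega)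
    rw [List.range_succ]
    simp only [List.foldl_append, List.foldl_cons, List.foldl_nil]
    constructor
    · rw [h1, pySetD_eq_set _ m _ (by simp; omega), h2]
      have hv : ((posIdx gl m (grpOf gl m)).getLast?).map (fun k => series.getD k 0)
          = aval series gl m := rfl
      rw [hv]
      apply List.ext_getElem (by simp)
      intro j hj1 hj2
      simp only [List.getElem_set, List.getElem_map, List.getElem_range]
      by_cases hjm : m = j
      · subst hjm
        simp
      · rw [if_neg hjm]
        split_ifs <;> first | rfl | omega
    · intro g
      rw [PySem.Dict.get?_insert, posIdx_succ]
      by_cases he : g = grpOf gl m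
      · rw [if_pos he, he]
        simp
      · rw [if_neg he, h2]
        have : (grpOf gl m == g) = false := by simp [Ne.symm he]
        simp [this]

lemma lag_grouped (series gl : List Int) :
    lag series (some gl) = target series gl := by
  have hgr : ∀ k, gl.getD k 0 = grpOf gl k := fun _ => rfl
  unfold lag
  rw [PySem.List.pyRange_one]
  simp only [Int.sub_zero, Int.toNat_natCast, List.foldl_map, zero_add,
    PySem.List.pyGetD_natCast, hgr]
  rw [(A_inv series gl series.length le_rfl).1]
  unfold target
  apply List.map_congr_left
  intro i hi
  rw [if_pos (List.mem_range.1 hi)]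

-- ===== VERDICT (by name: the statement is the Claim_ definition above) =====
theorem lag_spec : Claim_equal_lag := by
  intro series groups _ _
  unfold Spec_lag
  cases groups with
  | none => rfl
  | some gl => rw [lag_grouped, lag_alt_grouped]
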